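-- pv_equiv track=rewrite | github.com/harryroger798/social-lead-extractor-pro | backend/app/services/database_search.py | _get_city_aliases
-- ===== SOURCE A (Python) =====
-- _CITY_ALIASES: dict[str, list[str]] = {
--     "mumbai": ["mumbai", "bombay", "navi mumbai", "thane", "mum",
--                "kalyan", "mira road", "vasai", "virar", "dombivli",
--                "andheri", "bandra", "dadar", "kurla", "powai",
--                "malad", "borivali", "kandivali", "juhu", "worli",
--                "goregaon", "mulund", "chembur", "vashi", "panvel",
--                "maharashtra", "mh"],
--     "delhi": ["delhi", "new delhi", "ncr", "gurgaon", "noida", "faridabad",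
--               "gurugram", "ghaziabad", "greater noida",
--               "dwarka", "rohini", "pitampura", "connaught place",
--               "south delhi", "lajpat nagar", "saket", "vasant kunj",
--               "karol bagh", "rajouri garden", "janakpuri",
--               "national capital region"],
--     "bangalore": ["bangalore", "bengaluru", "blr", "bangaluru",
--                    "whitefield", "electronic city", "koramangala",
--                    "indiranagar", "hsr layout", "jayanagar",
--                    "marathahalli", "bellandur", "sarjapur",
--                    "karnataka", "ka"],
--     "chennai": ["chennai", "madras", "chn",
--                 "adyar", "anna nagar", "t nagar", "velachery",
--                 "tambaram", "porur", "guindy", "sholinganallur",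
--                 "tamil nadu", "tn"],
--     "pune": ["pune", "pcmc", "pimpri", "chinchwad",
--              "hinjewadi", "kharadi", "wakad", "baner",
--              "hadapsar", "viman nagar", "koregaon park",
--              "maharashtra"],
--     "hyderabad": ["hyderabad", "hyd", "secunderabad", "cyberabad",
--                    "hitec city", "gachibowli", "madhapur",
--                    "kukatpally", "kondapur", "banjara hills",
--                    "jubilee hills", "ameerpet",
--                    "telangana", "ts"],
--     "kolkata": ["kolkata", "calcutta", "kol",
--                 "salt lake", "new town", "howrah", "dum dum",
--                 "park street", "ballygunge", "rajarhat",
--                 "west bengal", "wb"],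
--     "ahmedabad": ["ahmedabad", "amdavad",
--                    "gandhinagar", "sg highway", "bopal",
--                    "prahlad nagar", "satellite", "navrangpura",
--                    "gujarat", "gj"],
--     "jaipur": ["jaipur", "pink city",
--                "malviya nagar", "vaishali nagar", "mansarovar",
--                "rajasthan", "rj"],
--     "lucknow": ["lucknow", "lko",
--                 "gomti nagar", "hazratganj", "aliganj",
--                 "uttar pradesh", "up"],
--     "chandigarh": ["chandigarh", "chd", "mohali", "panchkula",
--                     "tricity"],
--     "kochi": ["kochi", "cochin", "ernakulam",
--               "vyttila", "edappally", "kakkanad",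
--               "kerala", "kl"],
--     "indore": ["indore", "idr",
--                "vijay nagar", "palasia",
--                "madhya pradesh", "mp"],
--     "nagpur": ["nagpur", "ngp",
--                "dharampeth", "sitabuldi",
--                "maharashtra"],
--     "coimbatore": ["coimbatore", "kovai",
--                     "gandhipuram", "peelamedu", "saravanampatti",
--                     "tamil nadu"],
--     "visakhapatnam": ["visakhapatnam", "vizag", "visakha",
--                        "andhra pradesh", "ap"],
--     "surat": ["surat", "adajan", "vesu", "gujarat"],
--     "patna": ["patna", "boring road", "kankarbagh", "bihar"],
--     "bhopal": ["bhopal", "mp nagar", "madhya pradesh"],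
--     "thiruvananthapuram": ["thiruvananthapuram", "trivandrum", "kerala"],
--     "guwahati": ["guwahati", "gauhati", "assam"],
-- }
--
-- def _get_city_aliases(target: str) -> list[str]:
--     """Return all aliases for a target city, or [target] if no aliases found."""
--     target_lower = target.lower().strip()
--     # Check if target matches any alias key
--     if target_lower in _CITY_ALIASES:
--         return _CITY_ALIASES[target_lower]
--     # Check if target is an alias value
--     for canonical, aliases in _CITY_ALIASES.items():
--         if target_lower in aliases:
--             return aliases
--     return [target_lower]
-- ===== SOURCE B (Python) =====
-- # B: precomputed flat alias -> alias-group index (literal data, one dict lookup per call).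
-- # Group lists are shared; each alias maps to the group of the first city that declares it.
--
-- _G_MUMBAI = ['mumbai', 'bombay', 'navi mumbai', 'thane', 'mum', 'kalyan', 'mira road', 'vasai', 'virar', 'dombivli', 'andheri', 'bandra', 'dadar', 'kurla', 'powai', 'malad', 'borivali', 'kandivali', 'juhu', 'worli', 'goregaon', 'mulund', 'chembur', 'vashi', 'panvel', 'maharashtra', 'mh']
-- _G_DELHI = ['delhi', 'new delhi', 'ncr', 'gurgaon', 'noida', 'faridabad', 'gurugram', 'ghaziabad', 'greater noida', 'dwarka', 'rohini', 'pitampura', 'connaught place', 'south delhi', 'lajpat nagar', 'saket', 'vasant kunj', 'karol bagh', 'rajouri garden', 'janakpuri', 'national capital region']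
-- _G_BANGALORE = ['bangalore', 'bengaluru', 'blr', 'bangaluru', 'whitefield', 'electronic city', 'koramangala', 'indiranagar', 'hsr layout', 'jayanagar', 'marathahalli', 'bellandur', 'sarjapur', 'karnataka', 'ka']
-- _G_CHENNAI = ['chennai', 'madras', 'chn', 'adyar', 'anna nagar', 't nagar', 'velachery', 'tambaram', 'porur', 'guindy', 'sholinganallur', 'tamil nadu', 'tn']
-- _G_PUNE = ['pune', 'pcmc', 'pimpri', 'chinchwad', 'hinjewadi', 'kharadi', 'wakad', 'baner', 'hadapsar', 'viman nagar', 'koregaon park', 'maharashtra']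
-- _G_HYDERABAD = ['hyderabad', 'hyd', 'secunderabad', 'cyberabad', 'hitec city', 'gachibowli', 'madhapur', 'kukatpally', 'kondapur', 'banjara hills', 'jubilee hills', 'ameerpet', 'telangana', 'ts']
-- _G_KOLKATA = ['kolkata', 'calcutta', 'kol', 'salt lake', 'new town', 'howrah', 'dum dum', 'park street', 'ballygunge', 'rajarhat', 'west bengal', 'wb']
-- _G_AHMEDABAD = ['ahmedabad', 'amdavad', 'gandhinagar', 'sg highway', 'bopal', 'prahlad nagar', 'satellite', 'navrangpura', 'gujarat', 'gj']
-- _G_JAIPUR = ['jaipur', 'pink city', 'malviya nagar', 'vaishali nagar', 'mansarovar', 'rajasthan', 'rj']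
-- _G_LUCKNOW = ['lucknow', 'lko', 'gomti nagar', 'hazratganj', 'aliganj', 'uttar pradesh', 'up']
-- _G_CHANDIGARH = ['chandigarh', 'chd', 'mohali', 'panchkula', 'tricity']
-- _G_KOCHI = ['kochi', 'cochin', 'ernakulam', 'vyttila', 'edappally', 'kakkanad', 'kerala', 'kl']
-- _G_INDORE = ['indore', 'idr', 'vijay nagar', 'palasia', 'madhya pradesh', 'mp']
-- _G_NAGPUR = ['nagpur', 'ngp', 'dharampeth', 'sitabuldi', 'maharashtra']
-- _G_COIMBATORE = ['coimbatore', 'kovai', 'gandhipuram', 'peelamedu', 'saravanampatti', 'tamil nadu']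
-- _G_VISAKHAPATNAM = ['visakhapatnam', 'vizag', 'visakha', 'andhra pradesh', 'ap']
-- _G_SURAT = ['surat', 'adajan', 'vesu', 'gujarat']
-- _G_PATNA = ['patna', 'boring road', 'kankarbagh', 'bihar']
-- _G_BHOPAL = ['bhopal', 'mp nagar', 'madhya pradesh']
-- _G_THIRUVANANTHAPURAM = ['thiruvananthapuram', 'trivandrum', 'kerala']
-- _G_GUWAHATI = ['guwahati', 'gauhati', 'assam']
--
-- _ALIAS_INDEX = {
--     'mumbai': _G_MUMBAI,
--     'bombay': _G_MUMBAI,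
--     'navi mumbai': _G_MUMBAI,
--     'thane': _G_MUMBAI,
--     'mum': _G_MUMBAI,
--     'kalyan': _G_MUMBAI,
--     'mira road': _G_MUMBAI,
--     'vasai': _G_MUMBAI,
--     'virar': _G_MUMBAI,
--     'dombivli': _G_MUMBAI,
--     'andheri': _G_MUMBAI,
--     'bandra': _G_MUMBAI,
--     'dadar': _G_MUMBAI,
--     'kurla': _G_MUMBAI,
--     'powai': _G_MUMBAI,
--     'malad': _G_MUMBAI,
--     'borivali': _G_MUMBAI,
--     'kandivali': _G_MUMBAI,
--     'juhu': _G_MUMBAI,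
--     'worli': _G_MUMBAI,
--     'goregaon': _G_MUMBAI,
--     'mulund': _G_MUMBAI,
--     'chembur': _G_MUMBAI,
--     'vashi': _G_MUMBAI,
--     'panvel': _G_MUMBAI,
--     'maharashtra': _G_MUMBAI,
--     'mh': _G_MUMBAI,
--     'delhi': _G_DELHI,
--     'new delhi': _G_DELHI,
--     'ncr': _G_DELHI,
--     'gurgaon': _G_DELHI,
--     'noida': _G_DELHI,
--     'faridabad': _G_DELHI,
--     'gurugram': _G_DELHI,
--     'ghaziabad': _G_DELHI,
--     'greater noida': _G_DELHI,
--     'dwarka': _G_DELHI,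
--     'rohini': _G_DELHI,
--     'pitampura': _G_DELHI,
--     'connaught place': _G_DELHI,
--     'south delhi': _G_DELHI,
--     'lajpat nagar': _G_DELHI,
--     'saket': _G_DELHI,
--     'vasant kunj': _G_DELHI,
--     'karol bagh': _G_DELHI,
--     'rajouri garden': _G_DELHI,
--     'janakpuri': _G_DELHI,
--     'national capital region': _G_DELHI,
--     'bangalore': _G_BANGALORE,
--     'bengaluru': _G_BANGALORE,
--     'blr': _G_BANGALORE,
--     'bangaluru': _G_BANGALORE,
--     'whitefield': _G_BANGALORE,
--     'electronic city': _G_BANGALORE,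
--     'koramangala': _G_BANGALORE,
--     'indiranagar': _G_BANGALORE,
--     'hsr layout': _G_BANGALORE,
--     'jayanagar': _G_BANGALORE,
--     'marathahalli': _G_BANGALORE,
--     'bellandur': _G_BANGALORE,
--     'sarjapur': _G_BANGALORE,
--     'karnataka': _G_BANGALORE,
--     'ka': _G_BANGALORE,
--     'chennai': _G_CHENNAI,
--     'madras': _G_CHENNAI,
--     'chn': _G_CHENNAI,
--     'adyar': _G_CHENNAI,
--     'anna nagar': _G_CHENNAI,
--     't nagar': _G_CHENNAI,
--     'velachery': _G_CHENNAI,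
--     'tambaram': _G_CHENNAI,
--     'porur': _G_CHENNAI,
--     'guindy': _G_CHENNAI,
--     'sholinganallur': _G_CHENNAI,
--     'tamil nadu': _G_CHENNAI,
--     'tn': _G_CHENNAI,
--     'pune': _G_PUNE,
--     'pcmc': _G_PUNE,
--     'pimpri': _G_PUNE,
--     'chinchwad': _G_PUNE,
--     'hinjewadi': _G_PUNE,
--     'kharadi': _G_PUNE,
--     'wakad': _G_PUNE,
--     'baner': _G_PUNE,
--     'hadapsar': _G_PUNE,
--     'viman nagar': _G_PUNE,
--     'koregaon park': _G_PUNE,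
--     'hyderabad': _G_HYDERABAD,
--     'hyd': _G_HYDERABAD,
--     'secunderabad': _G_HYDERABAD,
--     'cyberabad': _G_HYDERABAD,
--     'hitec city': _G_HYDERABAD,
--     'gachibowli': _G_HYDERABAD,
--     'madhapur': _G_HYDERABAD,
--     'kukatpally': _G_HYDERABAD,
--     'kondapur': _G_HYDERABAD,
--     'banjara hills': _G_HYDERABAD,
--     'jubilee hills': _G_HYDERABAD,
--     'ameerpet': _G_HYDERABAD,
--     'telangana': _G_HYDERABAD,
--     'ts': _G_HYDERABAD,
--     'kolkata': _G_KOLKATA,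
--     'calcutta': _G_KOLKATA,
--     'kol': _G_KOLKATA,
--     'salt lake': _G_KOLKATA,
--     'new town': _G_KOLKATA,
--     'howrah': _G_KOLKATA,
--     'dum dum': _G_KOLKATA,
--     'park street': _G_KOLKATA,
--     'ballygunge': _G_KOLKATA,
--     'rajarhat': _G_KOLKATA,
--     'west bengal': _G_KOLKATA,
--     'wb': _G_KOLKATA,
--     'ahmedabad': _G_AHMEDABAD,
--     'amdavad': _G_AHMEDABAD,
--     'gandhinagar': _G_AHMEDABAD,
--     'sg highway': _G_AHMEDABAD,
--     'bopal': _G_AHMEDABAD,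
--     'prahlad nagar': _G_AHMEDABAD,
--     'satellite': _G_AHMEDABAD,
--     'navrangpura': _G_AHMEDABAD,
--     'gujarat': _G_AHMEDABAD,
--     'gj': _G_AHMEDABAD,
--     'jaipur': _G_JAIPUR,
--     'pink city': _G_JAIPUR,
--     'malviya nagar': _G_JAIPUR,
--     'vaishali nagar': _G_JAIPUR,
--     'mansarovar': _G_JAIPUR,
--     'rajasthan': _G_JAIPUR,
--     'rj': _G_JAIPUR,
--     'lucknow': _G_LUCKNOW,
--     'lko': _G_LUCKNOW,
--     'gomti nagar': _G_LUCKNOW,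
--     'hazratganj': _G_LUCKNOW,
--     'aliganj': _G_LUCKNOW,
--     'uttar pradesh': _G_LUCKNOW,
--     'up': _G_LUCKNOW,
--     'chandigarh': _G_CHANDIGARH,
--     'chd': _G_CHANDIGARH,
--     'mohali': _G_CHANDIGARH,
--     'panchkula': _G_CHANDIGARH,
--     'tricity': _G_CHANDIGARH,
--     'kochi': _G_KOCHI,
--     'cochin': _G_KOCHI,
--     'ernakulam': _G_KOCHI,
--     'vyttila': _G_KOCHI,
--     'edappally': _G_KOCHI,
--     'kakkanad': _G_KOCHI,
--     'kerala': _G_KOCHI,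
--     'kl': _G_KOCHI,
--     'indore': _G_INDORE,
--     'idr': _G_INDORE,
--     'vijay nagar': _G_INDORE,
--     'palasia': _G_INDORE,
--     'madhya pradesh': _G_INDORE,
--     'mp': _G_INDORE,
--     'nagpur': _G_NAGPUR,
--     'ngp': _G_NAGPUR,
--     'dharampeth': _G_NAGPUR,
--     'sitabuldi': _G_NAGPUR,
--     'coimbatore': _G_COIMBATORE,
--     'kovai': _G_COIMBATORE,
--     'gandhipuram': _G_COIMBATORE,
--     'peelamedu': _G_COIMBATORE,
--     'saravanampatti': _G_COIMBATORE,
--     'visakhapatnam': _G_VISAKHAPATNAM,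
--     'vizag': _G_VISAKHAPATNAM,
--     'visakha': _G_VISAKHAPATNAM,
--     'andhra pradesh': _G_VISAKHAPATNAM,
--     'ap': _G_VISAKHAPATNAM,
--     'surat': _G_SURAT,
--     'adajan': _G_SURAT,
--     'vesu': _G_SURAT,
--     'patna': _G_PATNA,
--     'boring road': _G_PATNA,
--     'kankarbagh': _G_PATNA,
--     'bihar': _G_PATNA,
--     'bhopal': _G_BHOPAL,
--     'mp nagar': _G_BHOPAL,
--     'thiruvananthapuram': _G_THIRUVANANTHAPURAM,
--     'trivandrum': _G_THIRUVANANTHAPURAM,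
--     'guwahati': _G_GUWAHATI,
--     'gauhati': _G_GUWAHATI,
--     'assam': _G_GUWAHATI,
-- }
--
-- def _get_city_aliases(target: str) -> list[str]:
--     """Return all aliases for a target city, or [target] if no aliases found."""
--     target_lower = target.lower().strip()
--     return _ALIAS_INDEX.get(target_lower, [target_lower])
-- ===== Notes on version B (the rewrite author's own statement) =====
-- stated objective: alternative
-- what changed: Replaces A's per-call key check plus linear scan over every city's alias list with a precomputed flat alias->group index (literal dict whose values share the group lists, first-declaring city wins for shared aliases), so each call is a single dict lookup.
import Mathlib
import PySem

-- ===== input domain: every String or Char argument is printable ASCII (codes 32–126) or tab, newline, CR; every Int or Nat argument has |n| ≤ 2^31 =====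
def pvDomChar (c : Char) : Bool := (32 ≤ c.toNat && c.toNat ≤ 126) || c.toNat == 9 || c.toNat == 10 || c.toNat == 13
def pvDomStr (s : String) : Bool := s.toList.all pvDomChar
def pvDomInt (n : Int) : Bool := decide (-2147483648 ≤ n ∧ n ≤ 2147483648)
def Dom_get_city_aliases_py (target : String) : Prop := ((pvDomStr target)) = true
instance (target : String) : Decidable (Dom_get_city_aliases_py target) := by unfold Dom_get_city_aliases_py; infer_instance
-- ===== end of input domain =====

-- B replaces A's per-call key check plus scan over every city's alias list with a flat
-- precomputed alias->group index (literal data, one dict lookup per call); objective: alternative.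

-- ===== PORT A =====
-- the module-level _CITY_ALIASES dict (items in Python insertion order)
def cityAliasesItems : List (String × List String) := [
  ("mumbai", ["mumbai", "bombay", "navi mumbai", "thane", "mum", "kalyan", "mira road", "vasai", "virar", "dombivli", "andheri", "bandra", "dadar", "kurla", "powai", "malad", "borivali", "kandivali", "juhu", "worli", "goregaon", "mulund", "chembur", "vashi", "panvel", "maharashtra", "mh"]),
  ("delhi", ["delhi", "new delhi", "ncr", "gurgaon", "noida", "faridabad", "gurugram", "ghaziabad", "greater noida", "dwarka", "rohini", "pitampura", "connaught place", "south delhi", "lajpat nagar", "saket", "vasant kunj", "karol bagh", "rajouri garden", "janakpuri", "national capital region"]),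
  ("bangalore", ["bangalore", "bengaluru", "blr", "bangaluru", "whitefield", "electronic city", "koramangala", "indiranagar", "hsr layout", "jayanagar", "marathahalli", "bellandur", "sarjapur", "karnataka", "ka"]),
  ("chennai", ["chennai", "madras", "chn", "adyar", "anna nagar", "t nagar", "velachery", "tambaram", "porur", "guindy", "sholinganallur", "tamil nadu", "tn"]),
  ("pune", ["pune", "pcmc", "pimpri", "chinchwad", "hinjewadi", "kharadi", "wakad", "baner", "hadapsar", "viman nagar", "koregaon park", "maharashtra"]),
  ("hyderabad", ["hyderabad", "hyd", "secunderabad", "cyberabad", "hitec city", "gachibowli", "madhapur", "kukatpally", "kondapur", "banjara hills", "jubilee hills", "ameerpet", "telangana", "ts"]),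
  ("kolkata", ["kolkata", "calcutta", "kol", "salt lake", "new town", "howrah", "dum dum", "park street", "ballygunge", "rajarhat", "west bengal", "wb"]),
  ("ahmedabad", ["ahmedabad", "amdavad", "gandhinagar", "sg highway", "bopal", "prahlad nagar", "satellite", "navrangpura", "gujarat", "gj"]),
  ("jaipur", ["jaipur", "pink city", "malviya nagar", "vaishali nagar", "mansarovar", "rajasthan", "rj"]),
  ("lucknow", ["lucknow", "lko", "gomti nagar", "hazratganj", "aliganj", "uttar pradesh", "up"]),
  ("chandigarh", ["chandigarh", "chd", "mohali", "panchkula", "tricity"]),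
  ("kochi", ["kochi", "cochin", "ernakulam", "vyttila", "edappally", "kakkanad", "kerala", "kl"]),
  ("indore", ["indore", "idr", "vijay nagar", "palasia", "madhya pradesh", "mp"]),
  ("nagpur", ["nagpur", "ngp", "dharampeth", "sitabuldi", "maharashtra"]),
  ("coimbatore", ["coimbatore", "kovai", "gandhipuram", "peelamedu", "saravanampatti", "tamil nadu"]),
  ("visakhapatnam", ["visakhapatnam", "vizag", "visakha", "andhra pradesh", "ap"]),
  ("surat", ["surat", "adajan", "vesu", "gujarat"]),
  ("patna", ["patna", "boring road", "kankarbagh", "bihar"]),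
  ("bhopal", ["bhopal", "mp nagar", "madhya pradesh"]),
  ("thiruvananthapuram", ["thiruvananthapuram", "trivandrum", "kerala"]),
  ("guwahati", ["guwahati", "gauhati", "assam"])]

def cityAliasesDict : PySem.Dict String (List String) := PySem.Dict.mk cityAliasesItems

-- A's 'for canonical, aliases in _CITY_ALIASES.items(): if target_lower in aliases: return aliases'
def scanAliasesA (s : String) : List (String × List String) → Option (List String)
  | [] => none
  | p :: rest => if s ∈ p.2 then some p.2 else scanAliasesA s rest

def get_city_aliases_py (target : String) : List String :=
  let target_lower := PySem.Str.strip (PySem.Str.lower target)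
  if cityAliasesDict.contains target_lower then cityAliasesDict.getD target_lower []
  else
    match scanAliasesA target_lower cityAliasesDict.items with
    | some aliases => aliases
    | none => [target_lower]

-- ===== PORT B =====
-- the shared group lists (_G_* in Source B)
def grp_mumbai : List String := ["mumbai", "bombay", "navi mumbai", "thane", "mum", "kalyan", "mira road", "vasai", "virar", "dombivli", "andheri", "bandra", "dadar", "kurla", "powai", "malad", "borivali", "kandivali", "juhu", "worli", "goregaon", "mulund", "chembur", "vashi", "panvel", "maharashtra", "mh"]
def grp_delhi : List String := ["delhi", "new delhi", "ncr", "gurgaon", "noida", "faridabad", "gurugram", "ghaziabad", "greater noida", "dwarka", "rohini", "pitampura", "connaught place", "south delhi", "lajpat nagar", "saket", "vasant kunj", "karol bagh", "rajouri garden", "janakpuri", "national capital region"]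
def grp_bangalore : List String := ["bangalore", "bengaluru", "blr", "bangaluru", "whitefield", "electronic city", "koramangala", "indiranagar", "hsr layout", "jayanagar", "marathahalli", "bellandur", "sarjapur", "karnataka", "ka"]
def grp_chennai : List String := ["chennai", "madras", "chn", "adyar", "anna nagar", "t nagar", "velachery", "tambaram", "porur", "guindy", "sholinganallur", "tamil nadu", "tn"]
def grp_pune : List String := ["pune", "pcmc", "pimpri", "chinchwad", "hinjewadi", "kharadi", "wakad", "baner", "hadapsar", "viman nagar", "koregaon park", "maharashtra"]
def grp_hyderabad : List String := ["hyderabad", "hyd", "secunderabad", "cyberabad", "hitec city", "gachibowli", "madhapur", "kukatpally", "kondapur", "banjara hills", "jubilee hills", "ameerpet", "telangana", "ts"]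
def grp_kolkata : List String := ["kolkata", "calcutta", "kol", "salt lake", "new town", "howrah", "dum dum", "park street", "ballygunge", "rajarhat", "west bengal", "wb"]
def grp_ahmedabad : List String := ["ahmedabad", "amdavad", "gandhinagar", "sg highway", "bopal", "prahlad nagar", "satellite", "navrangpura", "gujarat", "gj"]
def grp_jaipur : List String := ["jaipur", "pink city", "malviya nagar", "vaishali nagar", "mansarovar", "rajasthan", "rj"]
def grp_lucknow : List String := ["lucknow", "lko", "gomti nagar", "hazratganj", "aliganj", "uttar pradesh", "up"]
def grp_chandigarh : List String := ["chandigarh", "chd", "mohali", "panchkula", "tricity"]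
def grp_kochi : List String := ["kochi", "cochin", "ernakulam", "vyttila", "edappally", "kakkanad", "kerala", "kl"]
def grp_indore : List String := ["indore", "idr", "vijay nagar", "palasia", "madhya pradesh", "mp"]
def grp_nagpur : List String := ["nagpur", "ngp", "dharampeth", "sitabuldi", "maharashtra"]
def grp_coimbatore : List String := ["coimbatore", "kovai", "gandhipuram", "peelamedu", "saravanampatti", "tamil nadu"]
def grp_visakhapatnam : List String := ["visakhapatnam", "vizag", "visakha", "andhra pradesh", "ap"]
def grp_surat : List String := ["surat", "adajan", "vesu", "gujarat"]
def grp_patna : List String := ["patna", "boring road", "kankarbagh", "bihar"]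
def grp_bhopal : List String := ["bhopal", "mp nagar", "madhya pradesh"]
def grp_thiruvananthapuram : List String := ["thiruvananthapuram", "trivandrum", "kerala"]
def grp_guwahati : List String := ["guwahati", "gauhati", "assam"]

-- the literal flat index _ALIAS_INDEX: each alias mapped to the group of the first city declaring it
def reversePairs : List (String × List String) := [
  ("mumbai", grp_mumbai),
  ("bombay", grp_mumbai),
  ("navi mumbai", grp_mumbai),
  ("thane", grp_mumbai),
  ("mum", grp_mumbai),
  ("kalyan", grp_mumbai),
  ("mira road", grp_mumbai),
  ("vasai", grp_mumbai),
  ("virar", grp_mumbai),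
  ("dombivli", grp_mumbai),
  ("andheri", grp_mumbai),
  ("bandra", grp_mumbai),
  ("dadar", grp_mumbai),
  ("kurla", grp_mumbai),
  ("powai", grp_mumbai),
  ("malad", grp_mumbai),
  ("borivali", grp_mumbai),
  ("kandivali", grp_mumbai),
  ("juhu", grp_mumbai),
  ("worli", grp_mumbai),
  ("goregaon", grp_mumbai),
  ("mulund", grp_mumbai),
  ("chembur", grp_mumbai),
  ("vashi", grp_mumbai),
  ("panvel", grp_mumbai),
  ("maharashtra", grp_mumbai),
  ("mh", grp_mumbai),
  ("delhi", grp_delhi),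
  ("new delhi", grp_delhi),
  ("ncr", grp_delhi),
  ("gurgaon", grp_delhi),
  ("noida", grp_delhi),
  ("faridabad", grp_delhi),
  ("gurugram", grp_delhi),
  ("ghaziabad", grp_delhi),
  ("greater noida", grp_delhi),
  ("dwarka", grp_delhi),
  ("rohini", grp_delhi),
  ("pitampura", grp_delhi),
  ("connaught place", grp_delhi),
  ("south delhi", grp_delhi),
  ("lajpat nagar", grp_delhi),
  ("saket", grp_delhi),
  ("vasant kunj", grp_delhi),
  ("karol bagh", grp_delhi),
  ("rajouri garden", grp_delhi),
  ("janakpuri", grp_delhi),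
  ("national capital region", grp_delhi),
  ("bangalore", grp_bangalore),
  ("bengaluru", grp_bangalore),
  ("blr", grp_bangalore),
  ("bangaluru", grp_bangalore),
  ("whitefield", grp_bangalore),
  ("electronic city", grp_bangalore),
  ("koramangala", grp_bangalore),
  ("indiranagar", grp_bangalore),
  ("hsr layout", grp_bangalore),
  ("jayanagar", grp_bangalore),
  ("marathahalli", grp_bangalore),
  ("bellandur", grp_bangalore),
  ("sarjapur", grp_bangalore),
  ("karnataka", grp_bangalore),
  ("ka", grp_bangalore),
  ("chennai", grp_chennai),
  ("madras", grp_chennai),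
  ("chn", grp_chennai),
  ("adyar", grp_chennai),
  ("anna nagar", grp_chennai),
  ("t nagar", grp_chennai),
  ("velachery", grp_chennai),
  ("tambaram", grp_chennai),
  ("porur", grp_chennai),
  ("guindy", grp_chennai),
  ("sholinganallur", grp_chennai),
  ("tamil nadu", grp_chennai),
  ("tn", grp_chennai),
  ("pune", grp_pune),
  ("pcmc", grp_pune),
  ("pimpri", grp_pune),
  ("chinchwad", grp_pune),
  ("hinjewadi", grp_pune),
  ("kharadi", grp_pune),
  ("wakad", grp_pune),
  ("baner", grp_pune),
  ("hadapsar", grp_pune),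
  ("viman nagar", grp_pune),
  ("koregaon park", grp_pune),
  ("hyderabad", grp_hyderabad),
  ("hyd", grp_hyderabad),
  ("secunderabad", grp_hyderabad),
  ("cyberabad", grp_hyderabad),
  ("hitec city", grp_hyderabad),
  ("gachibowli", grp_hyderabad),
  ("madhapur", grp_hyderabad),
  ("kukatpally", grp_hyderabad),
  ("kondapur", grp_hyderabad),
  ("banjara hills", grp_hyderabad),
  ("jubilee hills", grp_hyderabad),
  ("ameerpet", grp_hyderabad),
  ("telangana", grp_hyderabad),
  ("ts", grp_hyderabad),
  ("kolkata", grp_kolkata),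
  ("calcutta", grp_kolkata),
  ("kol", grp_kolkata),
  ("salt lake", grp_kolkata),
  ("new town", grp_kolkata),
  ("howrah", grp_kolkata),
  ("dum dum", grp_kolkata),
  ("park street", grp_kolkata),
  ("ballygunge", grp_kolkata),
  ("rajarhat", grp_kolkata),
  ("west bengal", grp_kolkata),
  ("wb", grp_kolkata),
  ("ahmedabad", grp_ahmedabad),
  ("amdavad", grp_ahmedabad),
  ("gandhinagar", grp_ahmedabad),
  ("sg highway", grp_ahmedabad),
  ("bopal", grp_ahmedabad),
  ("prahlad nagar", grp_ahmedabad),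
  ("satellite", grp_ahmedabad),
  ("navrangpura", grp_ahmedabad),
  ("gujarat", grp_ahmedabad),
  ("gj", grp_ahmedabad),
  ("jaipur", grp_jaipur),
  ("pink city", grp_jaipur),
  ("malviya nagar", grp_jaipur),
  ("vaishali nagar", grp_jaipur),
  ("mansarovar", grp_jaipur),
  ("rajasthan", grp_jaipur),
  ("rj", grp_jaipur),
  ("lucknow", grp_lucknow),
  ("lko", grp_lucknow),
  ("gomti nagar", grp_lucknow),
  ("hazratganj", grp_lucknow),
  ("aliganj", grp_lucknow),
  ("uttar pradesh", grp_lucknow),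
  ("up", grp_lucknow),
  ("chandigarh", grp_chandigarh),
  ("chd", grp_chandigarh),
  ("mohali", grp_chandigarh),
  ("panchkula", grp_chandigarh),
  ("tricity", grp_chandigarh),
  ("kochi", grp_kochi),
  ("cochin", grp_kochi),
  ("ernakulam", grp_kochi),
  ("vyttila", grp_kochi),
  ("edappally", grp_kochi),
  ("kakkanad", grp_kochi),
  ("kerala", grp_kochi),
  ("kl", grp_kochi),
  ("indore", grp_indore),
  ("idr", grp_indore),
  ("vijay nagar", grp_indore),
  ("palasia", grp_indore),
  ("madhya pradesh", grp_indore),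
  ("mp", grp_indore),
  ("nagpur", grp_nagpur),
  ("ngp", grp_nagpur),
  ("dharampeth", grp_nagpur),
  ("sitabuldi", grp_nagpur),
  ("coimbatore", grp_coimbatore),
  ("kovai", grp_coimbatore),
  ("gandhipuram", grp_coimbatore),
  ("peelamedu", grp_coimbatore),
  ("saravanampatti", grp_coimbatore),
  ("visakhapatnam", grp_visakhapatnam),
  ("vizag", grp_visakhapatnam),
  ("visakha", grp_visakhapatnam),
  ("andhra pradesh", grp_visakhapatnam),
  ("ap", grp_visakhapatnam),
  ("surat", grp_surat),
  ("adajan", grp_surat),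
  ("vesu", grp_surat),
  ("patna", grp_patna),
  ("boring road", grp_patna),
  ("kankarbagh", grp_patna),
  ("bihar", grp_patna),
  ("bhopal", grp_bhopal),
  ("mp nagar", grp_bhopal),
  ("thiruvananthapuram", grp_thiruvananthapuram),
  ("trivandrum", grp_thiruvananthapuram),
  ("guwahati", grp_guwahati),
  ("gauhati", grp_guwahati),
  ("assam", grp_guwahati)]

def aliasIndex : PySem.Dict String (List String) := PySem.Dict.mk reversePairs

def get_city_aliases_py_alt (target : String) : List String :=
  let target_lower := PySem.Str.strip (PySem.Str.lower target)
  aliasIndex.getD target_lower [target_lower]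

-- ===== PRECONDITION & SPEC =====
def Spec_get_city_aliases_py (target : String) (out : List String) : Prop := out = get_city_aliases_py_alt target
instance (target : String) (out : List String) : Decidable (Spec_get_city_aliases_py target out) := by unfold Spec_get_city_aliases_py; infer_instance

-- ===== CLAIM =====
def Claim_equal_get_city_aliases_py : Prop := ∀ (target : String), Dom_get_city_aliases_py target → Spec_get_city_aliases_py target (get_city_aliases_py target)

-- ===== LEMMAS AND PROOFS =====

-- first-match association lookup, the reading of get? of a literal dict
def assocFind (s : String) : List (String × List String) → Option (List String)
  | [] => none
  | p :: rest => if p.1 = s then some p.2 else assocFind s rest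

theorem get?_mk_eq_assocFind (pairs : List (String × List String)) (s : String) :
    (PySem.Dict.mk pairs).get? s = assocFind s pairs := by
  induction pairs with
  | nil => simp [PySem.Dict.get?, assocFind]
  | cons p rest ih =>
    rw [assocFind]
    rcases p with ⟨k, v⟩
    rw [PySem.Dict.get?_mk_cons, ih]
    simp

-- the forward table flattened into alias->group pairs in scan order
def flatPairs : List (String × List String) :=
  cityAliasesItems.flatMap (fun p => p.2.map (fun a => (a, p.2)))

theorem assocFind_map_append (l : List String) (v : List String)
    (t : List (String × List String)) (s : String) :
    assocFind s (l.map (fun a => (a, v)) ++ t)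
      = if s ∈ l then some v else assocFind s t := by
  induction l with
  | nil => simp
  | cons a rest ih =>
    rw [List.map_cons, List.cons_append, assocFind]
    by_cases h : a = s
    · rw [if_pos h, if_pos (h ▸ List.mem_cons_self)]
    · rw [if_neg h, ih]
      by_cases hm : s ∈ rest
      · rw [if_pos hm, if_pos (List.mem_cons_of_mem _ hm)]
      · rw [if_neg hm, if_neg]
        intro hmem
        rcases List.mem_cons.mp hmem with h' | h'
        · exact h h'.symm
        · exact hm h' 

theorem assocFind_flatPairs_eq_scan (items : List (String × List String)) (s : String) :
    assocFind s (items.flatMap (fun p => p.2.map (fun a => (a, p.2)))) = scanAliasesA s items := by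
  induction items with
  | nil => rfl
  | cons p rest ih =>
    rw [List.flatMap_cons, assocFind_map_append, scanAliasesA, ih]

-- first-wins key dedup, the shape of the literal index
def dedupKeysAux (seen : List String) : List (String × List String) → List (String × List String)
  | [] => []
  | p :: rest =>
    if p.1 ∈ seen then dedupKeysAux seen rest
    else p :: dedupKeysAux (p.1 :: seen) rest

theorem assocFind_dedupKeysAux (l : List (String × List String)) (seen : List String)
    (s : String) (hs : s ∉ seen) :
    assocFind s (dedupKeysAux seen l) = assocFind s l := by
  induction l generalizing seen with
  | nil => rfl
  | cons p rest ih =>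
    rw [dedupKeysAux]
    by_cases hp : p.1 ∈ seen
    · rw [if_pos hp, ih seen hs, assocFind,
        if_neg (fun (h2 : p.1 = s) => hs (h2 ▸ hp))]
    · rw [if_neg hp, assocFind, assocFind]
      by_cases hps : p.1 = s
      · rw [if_pos hps, if_pos hps]
      · rw [if_neg hps, if_neg hps, ih]
        intro hmem
        rcases List.mem_cons.mp hmem with h' | h'
        · exact hps h'.symm
        · exact hs h' 

-- data fact: the literal index IS the first-wins dedup of the flattened forward table
set_option maxRecDepth 40000 in
theorem reversePairs_eq_dedup : reversePairs = dedupKeysAux [] flatPairs := by decide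

-- B characterised by A's scan
theorem alt_eq_scan (target : String) :
    get_city_aliases_py_alt target
      = (match scanAliasesA (PySem.Str.strip (PySem.Str.lower target)) cityAliasesItems with
         | some v => v
         | none => [PySem.Str.strip (PySem.Str.lower target)]) := by
  unfold get_city_aliases_py_alt aliasIndex
  rw [PySem.Dict.getD_eq_get?_getD, get?_mk_eq_assocFind, reversePairs_eq_dedup,
    assocFind_dedupKeysAux _ _ _ (List.not_mem_nil), flatPairs,
    assocFind_flatPairs_eq_scan]
  cases scanAliasesA (PySem.Str.strip (PySem.Str.lower target)) cityAliasesItems <;> rfl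

-- data fact: every key of _CITY_ALIASES is first found (as an alias) in its own list
theorem key_scan_self : ∀ p ∈ cityAliasesItems,
    scanAliasesA p.1 cityAliasesItems = some p.2 := by decide

-- ===== VERDICT =====
theorem get_city_aliases_py_spec : Claim_equal_get_city_aliases_py := by
  intro target _
  unfold Spec_get_city_aliases_py
  rw [alt_eq_scan]
  unfold get_city_aliases_py
  set tl := PySem.Str.strip (PySem.Str.lower target) with htl
  by_cases hc : cityAliasesDict.contains tl
  · rw [if_pos hc]
    have hs : (cityAliasesDict.get? tl).isSome := by
      rw [← PySem.Dict.contains_eq_isSome_get?]; exact hc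
    obtain ⟨v, hv⟩ := Option.isSome_iff_exists.mp hs
    have hscan : scanAliasesA tl cityAliasesItems = some v :=
      key_scan_self (tl, v) (PySem.Dict.mem_items_of_get?_eq_some _ hv)
    rw [PySem.Dict.getD_eq_get?_getD, hv, hscan]
    rfl
  · rw [if_neg hc]
    rcases h : scanAliasesA tl cityAliasesDict.items with _ | v <;>
      simp only [cityAliasesDict] at h <;> simp [h]
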